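-- pv_equiv track=rewrite | github.com/shine2lay/temper-ai | temper_ai/safety/_file_access_helpers.py | is_forbidden_file
-- ===== SOURCE A (Python) =====
-- def is_forbidden_file(
--     path: str, forbidden_files: set[str], case_sensitive: bool
-- ) -> bool:
--     """Check if path is a forbidden file.
--
--     Args:
--         path: Normalized file path
--         forbidden_files: Set of forbidden file paths
--         case_sensitive: Whether matching is case-sensitive
--
--     Returns:
--         True if file is forbidden
--     """
--     path_lower = path.lower() if not case_sensitive else path
--
--     for forbidden_file in forbidden_files:
--         forbidden_lower = (
--             forbidden_file.lower() if not case_sensitive else forbidden_file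
--         )
--         if path_lower == forbidden_lower or path_lower.endswith(forbidden_lower):
--             return True
--
--     return False
-- ===== SOURCE B (Python) =====
-- def is_forbidden_file(
--     path: str, forbidden_files: set[str], case_sensitive: bool
-- ) -> bool:
--     """Suffix-set formulation: collect all suffixes of the (possibly lowered)
--     path and intersect with the (possibly lowered) forbidden set."""
--     p = path if case_sensitive else path.lower()
--     fset = {f if case_sensitive else f.lower() for f in forbidden_files}
--     suffixes = {p[i:] for i in range(len(p) + 1)}
--     return not fset.isdisjoint(suffixes)
-- ===== Notes on version B (the rewrite author's own statement) =====
-- stated objective: alternative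
-- what changed: Replaces the scan of forbidden entries with endswith by building the set of all suffixes of the path once and testing set-disjointness against the lowered forbidden set.
import Mathlib
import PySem

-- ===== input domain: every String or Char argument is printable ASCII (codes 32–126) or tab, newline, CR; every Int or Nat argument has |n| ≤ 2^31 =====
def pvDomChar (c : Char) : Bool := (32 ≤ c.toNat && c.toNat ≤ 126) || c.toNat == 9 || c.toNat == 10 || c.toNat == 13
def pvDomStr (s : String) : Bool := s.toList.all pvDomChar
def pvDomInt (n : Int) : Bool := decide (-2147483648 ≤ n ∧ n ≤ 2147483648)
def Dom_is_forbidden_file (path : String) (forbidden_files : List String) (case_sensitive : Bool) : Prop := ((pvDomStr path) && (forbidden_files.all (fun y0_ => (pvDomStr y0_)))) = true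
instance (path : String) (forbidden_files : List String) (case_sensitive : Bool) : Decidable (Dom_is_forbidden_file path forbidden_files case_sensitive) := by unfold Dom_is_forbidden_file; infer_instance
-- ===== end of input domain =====

-- B replaces A's endswith scan over the forbidden entries by a suffix-set /
-- forbidden-set disjointness test (alternative decomposition; return value only).
-- ===== PORT A =====
-- the 'for forbidden_file in forbidden_files: if …: return True' loop
def pvGoA (pl : String) (cs : Bool) : List String → Bool
  | [] => false
  | f :: rest =>
    let fl := if !cs then PySem.Str.lower f else f
    if pl == fl || PySem.Str.endswith pl fl then true else pvGoA pl cs rest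

def is_forbidden_file (path : String) (forbidden_files : List String) (case_sensitive : Bool) : Bool :=
  let pl := if !case_sensitive then PySem.Str.lower path else path
  pvGoA pl case_sensitive forbidden_files

-- ===== PORT B =====
def is_forbidden_file_alt (path : String) (forbidden_files : List String) (case_sensitive : Bool) : Bool :=
  let p := if case_sensitive then path else PySem.Str.lower path
  let fset : PySem.Set String :=
    PySem.Set.ofList (forbidden_files.map (fun f => if case_sensitive then f else PySem.Str.lower f))
  let suffixes : PySem.Set String :=
    PySem.Set.ofList ((PySem.List.pyRange 0 (PySem.Str.len p + 1) 1).map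
      (fun i => PySem.Str.slice p (some i) none))
  !(PySem.Set.isdisjoint fset suffixes)

-- ===== PRECONDITION & SPEC =====
def Spec_is_forbidden_file (path : String) (forbidden_files : List String) (case_sensitive : Bool) (out : Bool) : Prop := out = is_forbidden_file_alt path forbidden_files case_sensitive
instance (path : String) (forbidden_files : List String) (case_sensitive : Bool) (out : Bool) : Decidable (Spec_is_forbidden_file path forbidden_files case_sensitive out) := by unfold Spec_is_forbidden_file; infer_instance

-- ===== CLAIM (what is proved, stated in full; the proofs are below) =====
def Claim_equal_is_forbidden_file : Prop := ∀ (path : String) (forbidden_files : List String) (case_sensitive : Bool), Dom_is_forbidden_file path forbidden_files case_sensitive → Spec_is_forbidden_file path forbidden_files case_sensitive (is_forbidden_file path forbidden_files case_sensitive)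

-- ===== LEMMAS AND PROOFS =====

-- a string q is in the suffix list of p iff p.endswith(q)
theorem mem_suffix_list_iff (p q : String) :
    (q ∈ (PySem.List.pyRange 0 (PySem.Str.len p + 1) 1).map
      (fun i => PySem.Str.slice p (some i) none)) ↔ PySem.Str.endswith p q = true := by
  simp only [List.mem_map, PySem.List.mem_pyRange_one, PySem.Str.endswith_eq,
    PySem.Chars.endswith_iff, PySem.Str.len_eq]
  constructor
  · rintro ⟨i, ⟨h0, hi⟩, rfl⟩
    have : (PySem.Str.slice p (some i) none).toList = p.toList.drop i.toNat := by
      simp [PySem.Str.toList_slice, PySem.List.slice_from _ h0]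
    rw [this]
    exact List.drop_suffix _ _
  · intro h
    have hd := List.suffix_iff_eq_drop.mp h
    refine ⟨((p.toList.length - q.toList.length : Nat) : Int), ⟨Int.natCast_nonneg _, by
      have : (p.toList.length - q.toList.length : Nat) ≤ p.toList.length := Nat.sub_le _ _
      omega⟩, ?_⟩
    apply String.toList_inj.mp
    have h0 : (0:Int) ≤ ((p.toList.length - q.toList.length : Nat) : Int) := Int.natCast_nonneg _
    simp only [PySem.Str.toList_slice, PySem.Chars.slice_eq_listSlice, PySem.List.slice_from _ h0, Int.toNat_natCast]
    exact hd.symm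

-- A's 'equal or endswith' test collapses to endswith alone (every string is its own suffix)
theorem eq_or_endswith (pl fl : String) :
    (pl == fl || PySem.Str.endswith pl fl) = PySem.Str.endswith pl fl := by
  by_cases he : pl = fl
  · subst he
    have h : PySem.Str.endswith pl pl = true := by
      rw [PySem.Str.endswith_eq, PySem.Chars.endswith_iff]
    rw [h, Bool.or_true]
  · simp [he]

-- A's loop is an 'any' over the forbidden list
theorem pvGoA_eq_any (pl : String) (cs : Bool) (fs : List String) :
    pvGoA pl cs fs
      = fs.any (fun f => PySem.Str.endswith pl (if !cs then PySem.Str.lower f else f)) := by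
  induction fs with
  | nil => rfl
  | cons f rest ih =>
    simp only [pvGoA, List.any_cons, ← ih]
    rw [show (if (pl == (if !cs then PySem.Str.lower f else f)
          || PySem.Str.endswith pl (if !cs then PySem.Str.lower f else f)) = true
        then true else pvGoA pl cs rest)
        = ((pl == (if !cs then PySem.Str.lower f else f)
          || PySem.Str.endswith pl (if !cs then PySem.Str.lower f else f)) || pvGoA pl cs rest)
      from by cases h : (pl == _ || _) <;> simp, eq_or_endswith]

-- 'some forbidden string is a suffix of p' as a disjointness test against p's suffix set
theorem any_endswith_eq_not_isdisjoint (p : String) (gs : List String) :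
    gs.any (fun g => PySem.Str.endswith p g)
      = !(PySem.Set.isdisjoint (PySem.Set.ofList gs)
          (PySem.Set.ofList ((PySem.List.pyRange 0 (PySem.Str.len p + 1) 1).map
            (fun i => PySem.Str.slice p (some i) none)))) := by
  apply Bool.coe_iff_coe.mp
  simp only [List.any_eq_true, Bool.not_eq_true', Bool.eq_false_iff, Ne,
    PySem.Set.isdisjoint_iff, PySem.Set.mem_ofList, mem_suffix_list_iff,
    not_forall, not_not, exists_prop]

-- the same, with the forbidden entries transformed first (A maps inside 'any', B maps before 'ofList')
theorem any_endswith_map_eq_not_isdisjoint (p : String) (fl : String → String) (fs : List String) :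
    (fs.any fun f => PySem.Str.endswith p (fl f))
      = !(PySem.Set.isdisjoint (PySem.Set.ofList (fs.map fl))
          (PySem.Set.ofList ((PySem.List.pyRange 0 (PySem.Str.len p + 1) 1).map
            (fun i => PySem.Str.slice p (some i) none)))) := by
  rw [← any_endswith_eq_not_isdisjoint p (fs.map fl), List.any_map]
  rfl

-- ===== VERDICT (by name: the statement is the Claim_ definition above) =====
theorem is_forbidden_file_spec : Claim_equal_is_forbidden_file := by
  intro path fs cs _
  unfold Spec_is_forbidden_file is_forbidden_file is_forbidden_file_alt
  cases cs
  · simp only [Bool.not_false, Bool.false_eq_true, if_true, if_false,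
      pvGoA_eq_any, any_endswith_map_eq_not_isdisjoint]
  · simp only [Bool.not_true, Bool.false_eq_true, if_true, if_false,
      pvGoA_eq_any, any_endswith_map_eq_not_isdisjoint path (fun f => f) fs,
      List.map_id']
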